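-- pv_equiv track=rewrite | github.com/Tencent/bk-base | src/api/datahub/access/collectors/log_collector/access.py | group_cond
-- ===== SOURCE A (Python) =====
-- def group_cond(conds):
--     cond_group = []
--     group = []
--
--     for cond in conds:
--         if cond["logic_op"] == "or":
--             cond_group.append(group)
--             group = []
--         group.append(cond)
--     if group:
--         cond_group.append(group)
--     return cond_group
-- ===== SOURCE B (Python) =====
-- def group_cond(conds):
--     # Recursive decomposition: cut off the run before the first 'or',
--     # then each later group is an 'or' condition plus the run after it.
--     if not conds:
--         return []
--
--     def split_run(xs):
--         # (prefix before the first 'or' condition, remainder starting at it)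
--         for i, c in enumerate(xs):
--             if c["logic_op"] == "or":
--                 return xs[:i], xs[i:]
--         return xs, []
--
--     def groups_from(xs):
--         # xs is empty or starts with an 'or' condition
--         if not xs:
--             return []
--         seg, tail = split_run(xs[1:])
--         return [[xs[0]] + seg] + groups_from(tail)
--
--     first, tail = split_run(conds)
--     return [first] + groups_from(tail)
-- ===== Notes on version B (the rewrite author's own statement) =====
-- stated objective: alternative
-- what changed: Replaces A's single accumulator loop (open group + closed groups, flushed at the end) with a recursive decomposition that splits the list at each 'or' condition and emits every group as a slice headed by its 'or' element.
import Mathlib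
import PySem

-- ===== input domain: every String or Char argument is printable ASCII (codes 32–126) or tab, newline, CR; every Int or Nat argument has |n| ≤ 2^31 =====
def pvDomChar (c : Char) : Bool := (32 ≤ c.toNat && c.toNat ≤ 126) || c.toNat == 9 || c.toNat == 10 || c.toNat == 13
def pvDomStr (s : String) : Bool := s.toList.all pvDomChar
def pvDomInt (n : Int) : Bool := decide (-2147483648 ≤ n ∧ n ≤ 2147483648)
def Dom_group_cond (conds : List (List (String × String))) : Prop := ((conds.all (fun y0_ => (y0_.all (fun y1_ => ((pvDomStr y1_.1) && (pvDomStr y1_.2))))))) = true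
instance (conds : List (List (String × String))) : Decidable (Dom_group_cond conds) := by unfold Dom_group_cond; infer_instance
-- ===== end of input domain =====

-- B groups conditions by splitting at each 'or' recursively instead of A's accumulator loop; alternative decomposition, same cost.

-- shared helper: cond["logic_op"] == "or" (total in Lean; Pre_ below keeps Python's KeyError out)
def isOrCond (c : List (String × String)) : Bool :=
  (PySem.Dict.mk c).get? "logic_op" == some "or"

-- ===== PORT A =====
def group_cond (conds : List (List (String × String))) : List (List (List (String × String))) :=
  let st := conds.foldl
    (fun (st : List (List (List (String × String))) × List (List (String × String))) cond =>
      let st := if isOrCond cond then (st.1 ++ [st.2], ([] : List (List (String × String)))) else st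
      (st.1, st.2 ++ [cond]))
    ([], [])
  if st.2.isEmpty then st.1 else st.1 ++ [st.2]

-- ===== PORT B =====
-- split_run: prefix before the first 'or' condition, remainder starting at it
def splitRun (xs : List (List (String × String))) :
    List (List (String × String)) × List (List (String × String)) :=
  match xs with
  | [] => ([], [])
  | c :: rest =>
      if isOrCond c then ([], c :: rest)
      else
        let p := splitRun rest
        (c :: p.1, p.2)

theorem splitRun_snd_len (xs : List (List (String × String))) :
    (splitRun xs).2.length ≤ xs.length := by
  induction xs with
  | nil => simp [splitRun]
  | cons c rest ih =>
      simp only [splitRun]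
      split
      · simp
      · simpa using Nat.le_succ_of_le ih

-- groups_from: xs is empty or starts with an 'or' condition
def groupsFrom (xs : List (List (String × String))) : List (List (List (String × String))) :=
  match xs with
  | [] => []
  | c :: rest =>
      ([c] ++ (splitRun rest).1) :: groupsFrom (splitRun rest).2
termination_by xs.length
decreasing_by
  exact Nat.lt_succ_of_le (splitRun_snd_len rest)

def group_cond_alt (conds : List (List (String × String))) : List (List (List (String × String))) :=
  if conds.isEmpty then []
  else [(splitRun conds).1] ++ groupsFrom (splitRun conds).2

-- ===== PRECONDITION & SPEC =====
-- Pre_ excludes exactly the inputs where some condition lacks the "logic_op" key: Python A (and B) raise KeyError there.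
def Pre_group_cond (conds : List (List (String × String))) : Prop :=
  ∀ c ∈ conds, ((PySem.Dict.mk c).get? "logic_op").isSome

instance (conds : List (List (String × String))) : Decidable (Pre_group_cond conds) := by
  unfold Pre_group_cond; infer_instance

def pvWitness_group_cond : (List (List (String × String))) :=
  [[("logic_op", "and"), ("field", "x")], [("logic_op", "or")]]

def Spec_group_cond (conds : List (List (String × String))) (out : List (List (List (String × String)))) : Prop := out = group_cond_alt conds
instance (conds : List (List (String × String))) (out : List (List (List (String × String)))) : Decidable (Spec_group_cond conds out) := by unfold Spec_group_cond; infer_instance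

-- ===== CLAIM (what is proved, stated in full; the proofs are below) =====
def Claim_equal_group_cond : Prop := ∀ (conds : List (List (String × String))), Dom_group_cond conds → Pre_group_cond conds → Spec_group_cond conds (group_cond conds)

-- ===== LEMMAS AND PROOFS =====

-- A's loop step and finalisation, named for the proofs
def stepA (st : List (List (List (String × String))) × List (List (String × String)))
    (cond : List (String × String)) :
    List (List (List (String × String))) × List (List (String × String)) :=
  let st := if isOrCond cond then (st.1 ++ [st.2], ([] : List (List (String × String)))) else st
  (st.1, st.2 ++ [cond])

def finishA (st : List (List (List (String × String))) × List (List (String × String))) :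
    List (List (List (String × String))) :=
  if st.2.isEmpty then st.1 else st.1 ++ [st.2]

theorem group_cond_eq_finish (conds : List (List (String × String))) :
    group_cond conds = finishA (conds.foldl stepA ([], [])) := rfl

-- the closed-groups accumulator only ever grows on the left
theorem finish_foldl_acc (xs : List (List (String × String)))
    (cg : List (List (List (String × String)))) (g : List (List (String × String))) :
    finishA (xs.foldl stepA (cg, g)) = cg ++ finishA (xs.foldl stepA ([], g)) := by
  induction xs generalizing cg g with
  | nil => cases g <;> simp [finishA]
  | cons c rest ih =>
      by_cases h : isOrCond c = true
      · simp only [List.foldl_cons, stepA, h, if_pos]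
        rw [ih (cg ++ [g]), ih ([] ++ [g])]
        simp
      · simp only [List.foldl_cons, stepA, h, if_neg, Bool.not_eq_true]
        rw [ih cg, ih ([] : List _)]

-- with a nonempty open group, the rest of A's run is B's (group-head ++ run, recurse) shape
theorem finish_foldl_splitRun (xs : List (List (String × String)))
    (g : List (List (String × String))) (hg : g ≠ []) :
    finishA (xs.foldl stepA ([], g)) =
      (g ++ (splitRun xs).1) :: groupsFrom (splitRun xs).2 := by
  induction xs generalizing g with
  | nil => simp [finishA, groupsFrom, splitRun, hg]
  | cons c rest ih =>
      by_cases h : isOrCond c = true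
      · simp only [List.foldl_cons, stepA, h, if_pos, splitRun]
        simp only [List.nil_append]
        rw [finish_foldl_acc rest [g] [c], ih [c] (by simp)]
        simp [groupsFrom]
      · simp only [List.foldl_cons, stepA, h, if_neg, Bool.not_eq_true, splitRun]
        rw [ih (g ++ [c]) (by simp)]
        simp

-- ===== VERDICT (by name: the statement is the Claim_ definition above) =====
theorem group_cond_spec : Claim_equal_group_cond := by
  intro conds _ _
  unfold Spec_group_cond
  rw [group_cond_eq_finish]
  cases conds with
  | nil => simp [finishA, group_cond_alt]
  | cons c rest =>
      have halt : group_cond_alt (c :: rest) =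
          [(splitRun (c :: rest)).1] ++ groupsFrom (splitRun (c :: rest)).2 := by
        simp [group_cond_alt]
      by_cases h : isOrCond c = true
      · simp only [List.foldl_cons, stepA, h, if_pos]
        simp only [List.nil_append]
        rw [finish_foldl_acc rest [[]] [c], finish_foldl_splitRun rest [c] (by simp)]
        rw [halt]
        simp [splitRun, h, groupsFrom]
      · simp only [List.foldl_cons, stepA, h, if_neg, Bool.not_eq_true]
        simp only [List.nil_append]
        rw [finish_foldl_splitRun rest [c] (by simp)]
        rw [halt]
        simp [splitRun, h]
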